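-- pv_equiv track=rewrite | github.com/mpbarbosa/ai_workflow | extract_api_docs.py | format_function_doc
-- ===== SOURCE A (Python) =====
-- from typing import List, Dict, Tuple
--
-- def format_function_doc(func_name: str, line_num: int, comments: List[str]) -> str:
--     """Format function documentation in markdown."""
--     doc = f"### `{func_name}`\n\n"
--
--     if comments:
--         # Parse structured comments
--         description = []
--         parameters = []
--         returns = []
--         examples = []
--         exit_codes = []
--         notes = []
--
--         current_section = description
--
--         for comment in comments:
--             comment_lower = comment.lower()
--
--             if comment_lower.startswith('param'):
--                 current_section = parameters
--                 parameters.append(comment)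
--             elif comment_lower.startswith('return'):
--                 current_section = returns
--                 returns.append(comment)
--             elif comment_lower.startswith('exit'):
--                 current_section = exit_codes
--                 exit_codes.append(comment)
--             elif comment_lower.startswith('example'):
--                 current_section = examples
--                 examples.append(comment)
--             elif comment_lower.startswith('note'):
--                 current_section = notes
--                 notes.append(comment)
--             elif comment in ['---', '===', '']:
--                 continue
--             else:
--                 current_section.append(comment)
--
--         # Format description
--         if description:
--             doc += "**Description**: " + " ".join(description) + "\n\n"
--
--         # Format parameters
--         if parameters:
--             doc += "**Parameters**:\n"
--             for param in parameters:
--                 doc += f"- {param}\n"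
--             doc += "\n"
--
--         # Format returns
--         if returns:
--             doc += "**Returns**: " + " ".join(returns) + "\n\n"
--
--         # Format exit codes
--         if exit_codes:
--             doc += "**Exit Codes**:\n"
--             for code in exit_codes:
--                 doc += f"- {code}\n"
--             doc += "\n"
--
--         # Format examples
--         if examples:
--             doc += "**Examples**:\n```bash\n"
--             for example in examples:
--                 if not example.lower().startswith('example'):
--                     doc += f"{example}\n"
--             doc += "```\n\n"
--
--         # Format notes
--         if notes:
--             doc += "**Notes**:\n"
--             for note in notes:
--                 doc += f"- {note}\n"
--             doc += "\n"
--     else: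
--         doc += "*No documentation available*\n\n"
--
--     doc += f"**Source Line**: {line_num}\n\n"
--     doc += "---\n\n"
--
--     return doc
-- ===== SOURCE B (Python) =====
-- # B: staged pipeline over a labeled comment stream instead of A's single-pass
-- # bucket accumulator: (1) map each comment to its explicit section key (or None),
-- # (2) forward-fill the keys, (3) drop separator lines, (4) extract each section
-- # by filtering the labeled stream, (5) concatenate pure per-section renderers.
--
-- _PREFIXES = (("param", "parameters"), ("return", "returns"),
--              ("exit", "exit_codes"), ("example", "examples"),
--              ("note", "notes"))
--
--
-- def _explicit_key(comment):
--     low = comment.lower()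
--     for prefix, key in _PREFIXES:
--         if low.startswith(prefix):
--             return key
--     return None
--
--
-- def _inline(title, items):
--     return f"**{title}**: " + " ".join(items) + "\n\n" if items else ""
--
--
-- def _bullets(title, items):
--     return f"**{title}**:\n" + "".join(f"- {x}\n" for x in items) + "\n" if items else ""
--
--
-- def _codeblock(title, items):
--     body = "".join(f"{x}\n" for x in items
--                    if not x.lower().startswith("example"))
--     return f"**{title}**:\n```bash\n" + body + "```\n\n" if items else ""
--
--
-- def format_function_doc(func_name, line_num, comments):
--     doc = f"### `{func_name}`\n\n"
--     if comments:
--         keys = [_explicit_key(c) for c in comments]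
--         filled = []
--         cur = "description"
--         for k in keys:
--             cur = k if k is not None else cur
--             filled.append(cur)
--         labeled = [(k, c) for k, c in zip(filled, comments)
--                    if c not in ("---", "===", "")]
--
--         def items(key):
--             return [c for k, c in labeled if k == key]
--
--         doc += (_inline("Description", items("description"))
--                 + _bullets("Parameters", items("parameters"))
--                 + _inline("Returns", items("returns"))
--                 + _bullets("Exit Codes", items("exit_codes"))
--                 + _codeblock("Examples", items("examples"))
--                 + _bullets("Notes", items("notes")))
--     else:
--         doc += "*No documentation available*\n\n"
--     return doc + f"**Source Line**: {line_num}\n\n---\n\n"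
-- ===== Notes on version B (the rewrite author's own statement) =====
-- stated objective: alternative
-- what changed: Replaces A's single-pass six-bucket accumulator with a staged pipeline: per-comment explicit-key map, forward-fill of keys, separator drop, then each section extracted by filtering the labeled stream and rendered by pure concatenated renderers.
import Mathlib
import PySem

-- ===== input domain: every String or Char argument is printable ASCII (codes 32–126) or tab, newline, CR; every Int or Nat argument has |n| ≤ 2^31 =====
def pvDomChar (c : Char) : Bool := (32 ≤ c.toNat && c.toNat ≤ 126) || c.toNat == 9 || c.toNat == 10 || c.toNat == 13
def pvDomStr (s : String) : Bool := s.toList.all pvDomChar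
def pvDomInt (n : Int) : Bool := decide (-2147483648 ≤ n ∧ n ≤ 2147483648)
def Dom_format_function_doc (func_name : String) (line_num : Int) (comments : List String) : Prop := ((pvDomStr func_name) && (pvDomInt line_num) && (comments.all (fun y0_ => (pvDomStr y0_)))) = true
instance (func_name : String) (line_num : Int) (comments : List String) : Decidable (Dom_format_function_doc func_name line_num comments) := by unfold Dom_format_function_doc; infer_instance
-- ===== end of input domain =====

-- B replaces A's single-pass six-bucket accumulator by a staged pipeline:
-- explicit-key map, forward-fill, separator drop, per-section filter, pure renderers
-- concatenated (objective: alternative).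

-- ===== PORT A =====
inductive ASec
  | desc | params | rets | exs | exits | nts
deriving DecidableEq, Repr

structure ASt where
  description : List String
  parameters  : List String
  returns     : List String
  examples    : List String
  exit_codes  : List String
  notes       : List String
  current     : ASec
deriving Repr

def aStep (st : ASt) (comment : String) : ASt :=
  let low := PySem.Str.lower comment
  if PySem.Str.startswith low "param" then
    { st with parameters := st.parameters ++ [comment], current := .params }
  else if PySem.Str.startswith low "return" then
    { st with returns := st.returns ++ [comment], current := .rets }
  else if PySem.Str.startswith low "exit" then
    { st with exit_codes := st.exit_codes ++ [comment], current := .exits }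
  else if PySem.Str.startswith low "example" then
    { st with examples := st.examples ++ [comment], current := .exs }
  else if PySem.Str.startswith low "note" then
    { st with notes := st.notes ++ [comment], current := .nts }
  else if comment = "---" ∨ comment = "===" ∨ comment = "" then st
  else
    match st.current with
    | .desc   => { st with description := st.description ++ [comment] }
    | .params => { st with parameters := st.parameters ++ [comment] }
    | .rets   => { st with returns := st.returns ++ [comment] }
    | .exs    => { st with examples := st.examples ++ [comment] }
    | .exits  => { st with exit_codes := st.exit_codes ++ [comment] }
    | .nts    => { st with notes := st.notes ++ [comment] }

def format_function_doc (func_name : String) (line_num : Int) (comments : List String) : String :=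
  let doc := "### `" ++ func_name ++ "`\n\n"
  let doc :=
    if comments ≠ [] then
      let st := comments.foldl aStep ⟨[], [], [], [], [], [], .desc⟩
      let doc := if st.description ≠ [] then
          doc ++ "**Description**: " ++ PySem.Str.join " " st.description ++ "\n\n" else doc
      let doc := if st.parameters ≠ [] then
          (st.parameters.foldl (fun d p => d ++ ("- " ++ p ++ "\n")) (doc ++ "**Parameters**:\n")) ++ "\n" else doc
      let doc := if st.returns ≠ [] then
          doc ++ "**Returns**: " ++ PySem.Str.join " " st.returns ++ "\n\n" else doc
      let doc := if st.exit_codes ≠ [] then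
          (st.exit_codes.foldl (fun d c => d ++ ("- " ++ c ++ "\n")) (doc ++ "**Exit Codes**:\n")) ++ "\n" else doc
      let doc := if st.examples ≠ [] then
          (st.examples.foldl
            (fun d e => if !(PySem.Str.startswith (PySem.Str.lower e) "example") then d ++ (e ++ "\n") else d)
            (doc ++ "**Examples**:\n```bash\n")) ++ "```\n\n" else doc
      let doc := if st.notes ≠ [] then
          (st.notes.foldl (fun d n => d ++ ("- " ++ n ++ "\n")) (doc ++ "**Notes**:\n")) ++ "\n" else doc
      doc
    else
      doc ++ "*No documentation available*\n\n"
  doc ++ ("**Source Line**: " ++ PySem.Int.toStr line_num ++ "\n\n") ++ "---\n\n"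

-- ===== PORT B =====
def bPrefixes : List (String × String) :=
  [("param", "parameters"), ("return", "returns"), ("exit", "exit_codes"),
   ("example", "examples"), ("note", "notes")]

-- _explicit_key
def explicitKey (comment : String) : Option String :=
  let low := PySem.Str.lower comment
  (bPrefixes.find? (fun pk => PySem.Str.startswith low pk.1)).map (·.2)

-- the forward-fill loop over the key list
def fillKeys : List (Option String) → String → List String
  | [], _ => []
  | k :: rest, cur =>
    let c := k.getD cur
    c :: fillKeys rest c

-- labeled = [(k, c) for k, c in zip(filled, comments) if c not in ("---","===","")]
def labeledOf (comments : List String) : List (String × String) :=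
  ((fillKeys (comments.map explicitKey) "description").zip comments).filter
    (fun p => !(p.2 == "---" || p.2 == "===" || p.2 == ""))

def itemsOf (labeled : List (String × String)) (key : String) : List String :=
  (labeled.filter (fun p => p.1 == key)).map (·.2)

def inlineSec (title : String) (items : List String) : String :=
  if items ≠ [] then "**" ++ title ++ "**: " ++ PySem.Str.join " " items ++ "\n\n" else ""

def bulletsSec (title : String) (items : List String) : String :=
  if items ≠ [] then
    "**" ++ title ++ "**:\n" ++ PySem.Str.join "" (items.map (fun x => "- " ++ x ++ "\n")) ++ "\n"
  else ""

def codeblockSec (title : String) (items : List String) : String :=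
  let body := PySem.Str.join ""
    ((items.filter (fun x => !PySem.Str.startswith (PySem.Str.lower x) "example")).map
      (fun x => x ++ "\n"))
  if items ≠ [] then "**" ++ title ++ "**:\n```bash\n" ++ body ++ "```\n\n" else ""

def format_function_doc_alt (func_name : String) (line_num : Int) (comments : List String) : String :=
  let doc := "### `" ++ func_name ++ "`\n\n"
  let doc :=
    if comments ≠ [] then
      let labeled := labeledOf comments
      doc ++ (inlineSec "Description" (itemsOf labeled "description")
        ++ bulletsSec "Parameters" (itemsOf labeled "parameters")
        ++ inlineSec "Returns" (itemsOf labeled "returns")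
        ++ bulletsSec "Exit Codes" (itemsOf labeled "exit_codes")
        ++ codeblockSec "Examples" (itemsOf labeled "examples")
        ++ bulletsSec "Notes" (itemsOf labeled "notes"))
    else
      doc ++ "*No documentation available*\n\n"
  doc ++ ("**Source Line**: " ++ PySem.Int.toStr line_num ++ "\n\n") ++ "---\n\n"

-- ===== PRECONDITION & SPEC =====
def Spec_format_function_doc (func_name : String) (line_num : Int) (comments : List String) (out : String) : Prop := out = format_function_doc_alt func_name line_num comments
instance (func_name : String) (line_num : Int) (comments : List String) (out : String) : Decidable (Spec_format_function_doc func_name line_num comments out) := by unfold Spec_format_function_doc; infer_instance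

-- ===== CLAIM (what is proved, stated in full; the proofs are below) =====
def Claim_equal_format_function_doc : Prop := ∀ (func_name : String) (line_num : Int) (comments : List String), Dom_format_function_doc func_name line_num comments → Spec_format_function_doc func_name line_num comments (format_function_doc func_name line_num comments)

-- ===== LEMMAS AND PROOFS =====
def tagKey : ASec → String
  | .desc => "description" | .params => "parameters" | .rets => "returns"
  | .exs => "examples" | .exits => "exit_codes" | .nts => "notes"

-- recursive characterization of the zip/filter pipeline
def lab : List String → String → List (String × String)
  | [], _ => []
  | c :: rest, cur =>
    let k := (explicitKey c).getD cur
    if c = "---" ∨ c = "===" ∨ c = "" then lab rest k else (k, c) :: lab rest k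

def labCore (comments : List String) (cur : String) : List (String × String) :=
  ((fillKeys (comments.map explicitKey) cur).zip comments).filter
    (fun p => !(p.2 == "---" || p.2 == "===" || p.2 == ""))

theorem labCore_eq_lab (comments : List String) (cur : String) :
    labCore comments cur = lab comments cur := by
  induction comments generalizing cur with
  | nil => rfl
  | cons c rest ih =>
    by_cases hsep : c = "---" ∨ c = "===" ∨ c = ""
    · simp [labCore, lab, fillKeys, List.filter_cons, hsep, ← ih] <;> tauto
    · simp [labCore, lab, fillKeys, List.filter_cons, hsep, ← ih] <;> tauto

def SecInv (st : ASt) (L : List (String × String)) (st' : ASt) : Prop :=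
  st'.description = st.description ++ itemsOf L "description" ∧
  st'.parameters = st.parameters ++ itemsOf L "parameters" ∧
  st'.returns = st.returns ++ itemsOf L "returns" ∧
  st'.examples = st.examples ++ itemsOf L "examples" ∧
  st'.exit_codes = st.exit_codes ++ itemsOf L "exit_codes" ∧
  st'.notes = st.notes ++ itemsOf L "notes"

theorem inv_fold (comments : List String) (st : ASt) :
    SecInv st (lab comments (tagKey st.current)) (comments.foldl aStep st) := by
  induction comments generalizing st with
  | nil => simp [SecInv, itemsOf, lab]
  | cons c rest ih =>
    have hrec := ih (aStep st c)
    by_cases p1 : PySem.Str.startswith (PySem.Str.lower c) "param"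
    · have hk : explicitKey c = some "parameters" := by
        simp [explicitKey, bPrefixes, List.find?, PySem.Str.startswith_eq] at p1 ⊢; simp [p1]
      have hns : ¬ (c = "---" ∨ c = "===" ∨ c = "") := by
        rintro (h | h | h) <;> subst h <;> simp_all <;> revert p1 <;> decide
      obtain ⟨i1, i2, i3, i4, i5, i6⟩ := hrec
      simp only [aStep, p1, if_true] at i1 i2 i3 i4 i5 i6
      refine ⟨?_, ?_, ?_, ?_, ?_, ?_⟩ <;>
        simp_all [lab, hk, hns, aStep, p1, itemsOf, List.filter, tagKey]
    · by_cases p2 : PySem.Str.startswith (PySem.Str.lower c) "return"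
      · have hk : explicitKey c = some "returns" := by
          simp [explicitKey, bPrefixes, List.find?, PySem.Str.startswith_eq] at p1 p2 ⊢; simp [p1, p2]
        have hns : ¬ (c = "---" ∨ c = "===" ∨ c = "") := by
          rintro (h | h | h) <;> subst h <;> simp_all <;> revert p2 <;> decide
        obtain ⟨i1, i2, i3, i4, i5, i6⟩ := hrec
        simp only [aStep, p1, p2, if_false, if_true] at i1 i2 i3 i4 i5 i6
        refine ⟨?_, ?_, ?_, ?_, ?_, ?_⟩ <;>
          simp_all [lab, hk, hns, aStep, p1, p2, itemsOf, List.filter, tagKey]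
      · by_cases p3 : PySem.Str.startswith (PySem.Str.lower c) "exit"
        · have hk : explicitKey c = some "exit_codes" := by
            simp [explicitKey, bPrefixes, List.find?, PySem.Str.startswith_eq] at p1 p2 p3 ⊢; simp [p1, p2, p3]
          have hns : ¬ (c = "---" ∨ c = "===" ∨ c = "") := by
            rintro (h | h | h) <;> subst h <;> simp_all <;> revert p3 <;> decide
          obtain ⟨i1, i2, i3, i4, i5, i6⟩ := hrec
          simp only [aStep, p1, p2, p3, if_false, if_true] at i1 i2 i3 i4 i5 i6
          refine ⟨?_, ?_, ?_, ?_, ?_, ?_⟩ <;>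
            simp_all [lab, hk, hns, aStep, p1, p2, p3, itemsOf, List.filter, tagKey]
        · by_cases p4 : PySem.Str.startswith (PySem.Str.lower c) "example"
          · have hk : explicitKey c = some "examples" := by
              simp [explicitKey, bPrefixes, List.find?, PySem.Str.startswith_eq] at p1 p2 p3 p4 ⊢; simp [p1, p2, p3, p4]
            have hns : ¬ (c = "---" ∨ c = "===" ∨ c = "") := by
              rintro (h | h | h) <;> subst h <;> simp_all <;> revert p4 <;> decide
            obtain ⟨i1, i2, i3, i4, i5, i6⟩ := hrec
            simp only [aStep, p1, p2, p3, p4, if_false, if_true] at i1 i2 i3 i4 i5 i6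
            refine ⟨?_, ?_, ?_, ?_, ?_, ?_⟩ <;>
              simp_all [lab, hk, hns, aStep, p1, p2, p3, p4, itemsOf, List.filter, tagKey]
          · by_cases p5 : PySem.Str.startswith (PySem.Str.lower c) "note"
            · have hk : explicitKey c = some "notes" := by
                simp [explicitKey, bPrefixes, List.find?, PySem.Str.startswith_eq] at p1 p2 p3 p4 p5 ⊢; simp [p1, p2, p3, p4, p5]
              have hns : ¬ (c = "---" ∨ c = "===" ∨ c = "") := by
                rintro (h | h | h) <;> subst h <;> simp_all <;> revert p5 <;> decide
              obtain ⟨i1, i2, i3, i4, i5, i6⟩ := hrec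
              simp only [aStep, p1, p2, p3, p4, p5, if_false, if_true] at i1 i2 i3 i4 i5 i6
              refine ⟨?_, ?_, ?_, ?_, ?_, ?_⟩ <;>
                simp_all [lab, hk, hns, aStep, p1, p2, p3, p4, p5, itemsOf, List.filter, tagKey]
            · have hk : explicitKey c = none := by
                simp [explicitKey, bPrefixes, List.find?, PySem.Str.startswith_eq] at p1 p2 p3 p4 p5 ⊢; simp [p1, p2, p3, p4, p5]
              by_cases hsep : c = "---" ∨ c = "===" ∨ c = ""
              · obtain ⟨i1, i2, i3, i4, i5, i6⟩ := hrec
                simp only [aStep, p1, p2, p3, p4, p5, hsep, if_false, if_true] at i1 i2 i3 i4 i5 i6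
                refine ⟨?_, ?_, ?_, ?_, ?_, ?_⟩ <;>
                  simp_all [lab, hk, hsep, aStep, p1, p2, p3, p4, p5]
              · obtain ⟨i1, i2, i3, i4, i5, i6⟩ := hrec
                cases hc : st.current <;>
                  simp only [aStep, p1, p2, p3, p4, p5, hsep, hc, if_false] at i1 i2 i3 i4 i5 i6 <;>
                  refine ⟨?_, ?_, ?_, ?_, ?_, ?_⟩ <;>
                  simp_all [lab, hk, hsep, aStep, p1, p2, p3, p4, p5, hc,
                    itemsOf, List.filter, tagKey]

theorem join0_cons (a : String) (l : List String) :
    PySem.Str.join "" (a :: l) = a ++ PySem.Str.join "" l := by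
  cases l with
  | nil => simp [PySem.Str.join]
  | cons b t => simp [PySem.Str.join, PySem.Chars.join_cons_cons]

theorem foldl_if_not_append (p : String → Bool) (f : String → String) (l : List String) (acc : String) :
    l.foldl (fun d x => if !p x then d ++ f x else d) acc
      = acc ++ PySem.Str.join "" ((l.filter (fun x => !p x)).map f) := by
  induction l generalizing acc with
  | nil => simp [PySem.Str.join]
  | cons c rest ih =>
    simp only [Bool.not_eq_true'] at ih ⊢
    by_cases hp : p c
    · simp [List.foldl_cons, List.filter_cons, hp, ih]
    · simp [List.foldl_cons, List.filter_cons, hp, ih, join0_cons, String.append_assoc]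

theorem foldl_append (f : String → String) (l : List String) (acc : String) :
    l.foldl (fun d x => d ++ f x) acc = acc ++ PySem.Str.join "" (l.map f) := by
  induction l generalizing acc with
  | nil => simp [PySem.Str.join]
  | cons c rest ih =>
    simp [List.foldl, ih, join0_cons, String.append_assoc]

-- ===== VERDICT (by name: the statement is the Claim_ definition above) =====
set_option maxHeartbeats 4000000 in
theorem format_function_doc_spec : Claim_equal_format_function_doc := by
  intro func_name line_num comments _
  unfold Spec_format_function_doc format_function_doc format_function_doc_alt
  by_cases hc : comments = []
  · simp [hc]
  · obtain ⟨i1, i2, i3, i4, i5, i6⟩ := inv_fold comments ⟨[], [], [], [], [], [], .desc⟩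
    have hlab : labeledOf comments = lab comments "description" := by
      simpa [labeledOf, labCore] using labCore_eq_lab comments "description"
    simp only [hc, ne_eq, not_false_iff, if_true, hlab]
    simp only [tagKey, List.nil_append] at i1 i2 i3 i4 i5 i6
    rw [← i1, ← i2, ← i3, ← i4, ← i5, ← i6]
    simp only [inlineSec, bulletsSec, codeblockSec, foldl_append, foldl_if_not_append]
    generalize (List.foldl aStep ⟨[], [], [], [], [], [], ASec.desc⟩ comments) = st
    obtain ⟨D, P, R, E, X, N, cur⟩ := st
    dsimp only
    simp only [ne_eq]
    split_ifs <;> simp [← String.append_assoc]
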